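-- pv_equiv track=rewrite | github.com/celord/pythonstuff | generarDiccionario.py | getVariacionesConRepeticion
-- ===== SOURCE A (Python) =====
-- def getVariacionesConRepeticion(ALFABETO , LONGITUD):
--   sumatorio = 0
--   for i in range(LONGITUD):
--     producto = 1
--     for j in range(i+1):
--       producto = producto * len(ALFABETO)
--     sumatorio = sumatorio + producto
--   return sumatorio
-- ===== SOURCE B (Python) =====
-- def getVariacionesConRepeticion(ALFABETO, LONGITUD):
--     n = len(ALFABETO)
--     sumatorio = 0
--     producto = 1
--     for _ in range(LONGITUD):
--         producto = producto * n
--         sumatorio = sumatorio + producto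
--     return sumatorio
-- ===== Notes on version B (the rewrite author's own statement) =====
-- stated objective: faster
-- what changed: Replaced the nested loop that recomputes each power of len(ALFABETO) from scratch with a single pass maintaining a running product.
import Mathlib
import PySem

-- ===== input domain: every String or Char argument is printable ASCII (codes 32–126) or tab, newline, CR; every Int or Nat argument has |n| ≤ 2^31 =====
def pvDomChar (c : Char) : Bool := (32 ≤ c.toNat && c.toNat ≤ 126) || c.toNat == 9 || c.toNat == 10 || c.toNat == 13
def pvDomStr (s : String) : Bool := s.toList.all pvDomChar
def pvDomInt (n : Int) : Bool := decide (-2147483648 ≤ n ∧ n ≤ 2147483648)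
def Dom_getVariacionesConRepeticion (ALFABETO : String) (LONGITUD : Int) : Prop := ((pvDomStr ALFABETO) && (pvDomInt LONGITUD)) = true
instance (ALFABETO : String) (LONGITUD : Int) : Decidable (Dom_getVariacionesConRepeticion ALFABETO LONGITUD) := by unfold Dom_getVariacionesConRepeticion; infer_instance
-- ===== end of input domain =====

-- B replaces A's nested loop (recomputing each power of len(ALFABETO)) by a single
-- pass with a running product: O(LONGITUD) multiplications instead of O(LONGITUD^2).


-- ===== PORT A =====
def getVariacionesConRepeticion (ALFABETO : String) (LONGITUD : Int) : Int :=
  (PySem.List.pyRange 0 LONGITUD 1).foldl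
    (fun sumatorio i =>
      sumatorio +
        (PySem.List.pyRange 0 (i + 1) 1).foldl
          (fun producto _ => producto * PySem.Str.len ALFABETO) 1)
    0

-- ===== PORT B =====
def getVariacionesConRepeticion_alt (ALFABETO : String) (LONGITUD : Int) : Int :=
  let n := PySem.Str.len ALFABETO
  ((PySem.List.pyRange 0 LONGITUD 1).foldl
      (fun (sp : Int × Int) _ => (sp.1 + sp.2 * n, sp.2 * n))
      (0, 1)).1

-- ===== PRECONDITION & SPEC =====
def Spec_getVariacionesConRepeticion (ALFABETO : String) (LONGITUD : Int) (out : Int) : Prop := out = getVariacionesConRepeticion_alt ALFABETO LONGITUD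
instance (ALFABETO : String) (LONGITUD : Int) (out : Int) : Decidable (Spec_getVariacionesConRepeticion ALFABETO LONGITUD out) := by unfold Spec_getVariacionesConRepeticion; infer_instance

-- ===== CLAIM (what is proved, stated in full; the proofs are below) =====
def Claim_equal_getVariacionesConRepeticion : Prop := ∀ (ALFABETO : String) (LONGITUD : Int), Dom_getVariacionesConRepeticion ALFABETO LONGITUD → Spec_getVariacionesConRepeticion ALFABETO LONGITUD (getVariacionesConRepeticion ALFABETO LONGITUD)

-- ===== LEMMAS AND PROOFS =====

-- geometric-sum with the FRONT recursion geom n (m+1) = n * (1 + geom n m)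
def pvGeom (n : Int) : Nat → Int
  | 0 => 0
  | m + 1 => n * (1 + pvGeom n m)

-- back recursion, needed on the A side
theorem pvGeom_succ_back (n : Int) (m : Nat) :
    pvGeom n (m + 1) = pvGeom n m + n ^ (m + 1) := by
  induction m with
  | zero => simp [pvGeom]
  | succ k ih =>
    calc pvGeom n (k + 2) = n * (1 + pvGeom n (k + 1)) := rfl
      _ = n * (1 + (pvGeom n k + n ^ (k + 1))) := by rw [ih]
      _ = n * (1 + pvGeom n k) + n ^ (k + 2) := by ring
      _ = pvGeom n (k + 1) + n ^ (k + 2) := rfl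

-- A's inner loop: multiplying p by n once per element gives p * n ^ length
theorem pvMulFold (n : Int) (l : List Int) (p : Int) :
    l.foldl (fun producto _ => producto * n) p = p * n ^ l.length := by
  induction l generalizing p with
  | nil => simp
  | cons x t ih => simp [List.foldl, ih (p * n)]; ring

-- B's loop over ANY list of length m: state goes (s, p) ↦ (s + p * geom m, p * n ^ m)
theorem pvFoldB (n : Int) (l : List Int) (s p : Int) :
    l.foldl (fun (sp : Int × Int) _ => (sp.1 + sp.2 * n, sp.2 * n)) (s, p)
      = (s + p * pvGeom n l.length, p * n ^ l.length) := by
  induction l generalizing s p with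
  | nil => simp [pvGeom]
  | cons x t ih =>
    simp only [List.foldl, ih (s + p * n) (p * n), List.length_cons, pvGeom]
    exact Prod.ext (by ring) (by ring)

-- A's outer loop over range(k) equals geom k
theorem pvFoldA (AL : String) (k : Nat) :
    (PySem.List.pyRange 0 (k : Int) 1).foldl
      (fun sumatorio i =>
        sumatorio +
          (PySem.List.pyRange 0 (i + 1) 1).foldl
            (fun producto _ => producto * PySem.Str.len AL) 1)
      0 = pvGeom (PySem.Str.len AL) k := by
  induction k with
  | zero => simp [pvGeom]
  | succ m ih =>
    have h : ((m : Int) + 1) = ((m + 1 : Nat) : Int) := by push_cast; ring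
    rw [← h, PySem.List.pyRange_one_succ_right (by positivity),
        List.foldl_append, ih, pvGeom_succ_back]
    simp only [List.foldl]
    rw [pvMulFold]
    have hlen : (PySem.List.pyRange 0 ((m : Int) + 1) 1).length = m + 1 := by
      rw [PySem.List.length_pyRange_one]; omega
    rw [hlen]; ring

-- ===== VERDICT (by name: the statement is the Claim_ definition above) =====
theorem getVariacionesConRepeticion_spec : Claim_equal_getVariacionesConRepeticion := by
  unfold Claim_equal_getVariacionesConRepeticion Spec_getVariacionesConRepeticion
  intro AL L _
  unfold getVariacionesConRepeticion getVariacionesConRepeticion_alt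
  by_cases hL : L ≤ 0
  · rw [PySem.List.pyRange_one_eq_nil hL]; simp
  · have hk : L = ((L.toNat : Nat) : Int) := (Int.toNat_of_nonneg (by omega)).symm
    rw [hk, pvFoldA]
    simp only [pvFoldB]
    simp [PySem.List.length_pyRange_one]
    congr 1
    omega
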